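-- pv_equiv track=rewrite | github.com/BlueAlder/advent-of-code-solutions | solutions/day17/part2.py | dropRock
-- ===== SOURCE A (Python) =====
-- def dropRock(rock, rocks):
--   new_position = []
--   for x, y in rock:
--     ny = y - 1
--     if ny == 0 or (x, ny) in rocks:
--       return rock, True
--     new_position.append((x, ny))
--   return new_position, False
-- ===== SOURCE B (Python) =====
-- def _shifted(rock, rocks):
--   # Recursively shift the rock's cells down by one; None signals a collision
--   # (floor reached or cell occupied) anywhere in the remainder.
--   if not rock:
--     return []
--   x, y = rock[0]
--   if y - 1 == 0 or (x, y - 1) in rocks: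
--     return None
--   rest = _shifted(rock[1:], rocks)
--   if rest is None:
--     return None
--   return [(x, y - 1)] + rest
--
-- def dropRock(rock, rocks):
--   moved = _shifted(rock, rocks)
--   if moved is None:
--     return rock, True
--   return moved, False
-- ===== Notes on version B (the rewrite author's own statement) =====
-- stated objective: alternative
-- what changed: Replaces A's iterative fused loop (accumulator + early return of the original rock on collision) by a recursive helper over the list structure that returns Optional[list]: None propagates a collision up, otherwise the shifted cells are built back-to-front by consing onto the recursive result; the caller maps None/list to (rock, True)/(moved, False).
import Mathlib
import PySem

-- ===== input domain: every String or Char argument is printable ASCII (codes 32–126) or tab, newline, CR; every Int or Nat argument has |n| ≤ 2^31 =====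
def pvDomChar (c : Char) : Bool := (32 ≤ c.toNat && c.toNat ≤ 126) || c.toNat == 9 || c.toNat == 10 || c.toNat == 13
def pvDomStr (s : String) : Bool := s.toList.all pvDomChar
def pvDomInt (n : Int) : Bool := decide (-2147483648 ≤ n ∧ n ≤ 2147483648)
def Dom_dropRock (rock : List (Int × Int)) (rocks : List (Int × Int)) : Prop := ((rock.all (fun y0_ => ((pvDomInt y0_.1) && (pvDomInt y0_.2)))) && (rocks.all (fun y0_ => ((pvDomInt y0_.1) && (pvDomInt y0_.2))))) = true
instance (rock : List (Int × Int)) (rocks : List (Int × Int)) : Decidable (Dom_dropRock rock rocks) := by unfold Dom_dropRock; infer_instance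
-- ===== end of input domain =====

-- B replaces A's iterative accumulator loop with early return by a recursive Option-valued
-- helper (None = collision, propagated up; cells built by consing); objective: alternative.

-- ===== PORT A =====
-- literal port of A's loop: accumulator `acc` = new_position, early return on collision
def dropRockGo (rock0 : List (Int × Int)) (rocks : List (Int × Int)) :
    List (Int × Int) → List (Int × Int) → (List (Int × Int)) × Bool
  | [], acc => (acc, false)
  | (x, y) :: rest, acc =>
    let ny := y - 1
    if ny = 0 ∨ (x, ny) ∈ rocks then (rock0, true)
    else dropRockGo rock0 rocks rest (acc ++ [(x, ny)])

def dropRock (rock : List (Int × Int)) (rocks : List (Int × Int)) : (List (Int × Int)) × Bool :=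
  dropRockGo rock rocks rock []

-- ===== PORT B =====
-- recursive helper: none signals a collision anywhere in the remainder
def shifted (rocks : List (Int × Int)) : List (Int × Int) → Option (List (Int × Int))
  | [] => some []
  | (x, y) :: rest =>
    if y - 1 = 0 ∨ (x, y - 1) ∈ rocks then none
    else
      match shifted rocks rest with
      | none => none
      | some tl => some ((x, y - 1) :: tl)

def dropRock_alt (rock : List (Int × Int)) (rocks : List (Int × Int)) : (List (Int × Int)) × Bool :=
  match shifted rocks rock with
  | none => (rock, true)
  | some moved => (moved, false)

-- ===== PRECONDITION & SPEC =====
def Spec_dropRock (rock : List (Int × Int)) (rocks : List (Int × Int)) (out : (List (Int × Int)) × Bool) : Prop := out = dropRock_alt rock rocks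
instance (rock : List (Int × Int)) (rocks : List (Int × Int)) (out : (List (Int × Int)) × Bool) : Decidable (Spec_dropRock rock rocks out) := by unfold Spec_dropRock; infer_instance

-- ===== CLAIM =====
def Claim_equal_dropRock : Prop := ∀ (rock : List (Int × Int)) (rocks : List (Int × Int)), Dom_dropRock rock rocks → Spec_dropRock rock rocks (dropRock rock rocks)

-- ===== LEMMAS AND PROOFS =====
theorem dropRockGo_eq (rock0 rocks : List (Int × Int)) :
    ∀ (rest acc : List (Int × Int)),
      dropRockGo rock0 rocks rest acc =
        match shifted rocks rest with
        | none => (rock0, true)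
        | some moved => (acc ++ moved, false) := by
  intro rest
  induction rest with
  | nil => intro acc; simp [dropRockGo, shifted]
  | cons hd tl ih =>
    intro acc
    obtain ⟨x, y⟩ := hd
    by_cases h : y - 1 = 0 ∨ (x, y - 1) ∈ rocks
    · simp [dropRockGo, shifted, h]
    · simp only [dropRockGo, if_neg h, ih, shifted]
      cases shifted rocks tl <;> simp

-- ===== VERDICT =====
theorem dropRock_spec : Claim_equal_dropRock := by
  intro rock rocks _
  unfold Spec_dropRock dropRock dropRock_alt
  rw [dropRockGo_eq]
  cases shifted rocks rock <;> simp
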